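-- pv_equiv track=rewrite | github.com/SorryDB/SorryDB | sorrydb/utils/verify_lean_interact.py | position_to_index
-- ===== SOURCE A (Python) =====
-- def position_to_index(content: str, line: int, column: int) -> int:
--     """
--     Convert a (line, column) position to a linear character index.
--
--     Args:
--         content: File content as a string
--         line: Line number (starts at 1)
--         column: Column number
--
--     Returns:
--         Linear character index corresponding to the position
--
--     Raises:
--         ValueError: If the line or column is out of range
--     """
--     lines = content.split("\n")
--
--     # Check if coordinates are valid
--     if line < 1 or line > len(lines):
--         raise ValueError(f"Line {line} out of range (1-{len(lines)})")
--     if column < 0 or column > len(lines[line - 1]):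
--         raise ValueError(f"Column {column} is out of range for line {line}")
--
--     # Add up the lengths of all previous lines plus newline characters
--     index = sum(len(lines[i]) + 1 for i in range(line - 1))
--
--     return index + column
-- ===== SOURCE B (Python) =====
-- def position_to_index(content: str, line: int, column: int) -> int:
--     """Convert a (line, column) position to a linear character index by
--     scanning newline positions instead of building a list of lines."""
--     total_lines = content.count("\n") + 1
--     if line < 1 or line > total_lines:
--         raise ValueError(f"Line {line} out of range (1-{total_lines})")
--     pos = 0
--     for _ in range(line - 1):
--         pos = content.find("\n", pos) + 1
--     end = content.find("\n", pos)
--     if end == -1: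
--         end = len(content)
--     if column < 0 or column > end - pos:
--         raise ValueError(f"Column {column} is out of range for line {line}")
--     return pos + column
-- ===== Notes on version B (the rewrite author's own statement) =====
-- stated objective: alternative
-- what changed: B scans newline positions with repeated str.find (and validates the line against content.count('\n')+1) instead of splitting the content into a list of lines and summing their lengths.
import Mathlib
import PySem

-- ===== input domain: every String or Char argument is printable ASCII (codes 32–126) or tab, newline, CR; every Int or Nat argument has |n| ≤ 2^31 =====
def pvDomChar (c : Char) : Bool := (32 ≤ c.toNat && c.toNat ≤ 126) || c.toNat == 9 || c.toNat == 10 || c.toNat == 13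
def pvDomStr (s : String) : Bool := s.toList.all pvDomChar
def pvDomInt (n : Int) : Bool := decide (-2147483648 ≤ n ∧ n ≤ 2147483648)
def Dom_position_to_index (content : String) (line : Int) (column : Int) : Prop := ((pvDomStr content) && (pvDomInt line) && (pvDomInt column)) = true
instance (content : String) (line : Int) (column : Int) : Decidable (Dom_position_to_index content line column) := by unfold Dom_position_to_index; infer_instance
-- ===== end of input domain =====

-- B replaces A's split-into-lines-and-sum by a scan of newline positions with repeated str.find;
-- equivalence is about the RETURN value on inputs where A returns (Pre_ excludes A's ValueError cases).

-- ===== PORT A =====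
-- content.split("\n") is ported on the character list: PySem.Chars.splitOn content.toList ['\n'] (exact).
-- Python 'raise ValueError' branches return 0 here; Pre_position_to_index excludes exactly those inputs.
def position_to_index (content : String) (line : Int) (column : Int) : Int :=
  let lines := PySem.Chars.splitOn content.toList ['\n']
  if line < 1 || line > (lines.length : Int) then 0
  else if column < 0 || column > PySem.Chars.len (PySem.List.pyGetD lines (line - 1) []) then 0
  else
    let index := ((PySem.List.pyRange 0 (line - 1) 1).map
      (fun i => PySem.Chars.len (PySem.List.pyGetD lines i []) + 1)).sum
    index + column

-- ===== PORT B =====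
-- the 'for _ in range(line - 1): pos = content.find("\n", pos) + 1' loop of Source B
def pviFindLoop (content : String) : Nat → Int → Int
  | 0, pos => pos
  | k + 1, pos => pviFindLoop content k (PySem.Str.findFrom content "\n" pos + 1)

-- raise branches return 0 (excluded by Pre_position_to_index)
def position_to_index_alt (content : String) (line : Int) (column : Int) : Int :=
  let totalLines : Int := (PySem.Str.count content "\n" : Int) + 1
  if line < 1 || line > totalLines then 0
  else
    let pos := pviFindLoop content (line - 1).toNat 0
    let end0 := PySem.Str.findFrom content "\n" pos
    let endI := if end0 == -1 then PySem.Str.len content else end0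
    if column < 0 || column > endI - pos then 0
    else pos + column

-- ===== PRECONDITION & SPEC =====
-- Pre_ admits exactly the inputs on which Python A returns normally (both ValueError branches excluded).
def Pre_position_to_index (content : String) (line : Int) (column : Int) : Prop :=
  let lines := PySem.Chars.splitOn content.toList ['\n']
  1 ≤ line ∧ line ≤ (lines.length : Int) ∧ 0 ≤ column ∧
    column ≤ ((lines.getD (line - 1).toNat []).length : Int)
instance (content : String) (line : Int) (column : Int) : Decidable (Pre_position_to_index content line column) := by unfold Pre_position_to_index; infer_instance

def pvWitness_position_to_index : String × Int × Int := ("ab\ncd", 2, 1)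

def Spec_position_to_index (content : String) (line : Int) (column : Int) (out : Int) : Prop := out = position_to_index_alt content line column
instance (content : String) (line : Int) (column : Int) (out : Int) : Decidable (Spec_position_to_index content line column out) := by unfold Spec_position_to_index; infer_instance

-- ===== CLAIM (what is proved, stated in full; the proofs are below) =====
def Claim_equal_position_to_index : Prop := ∀ (content : String) (line : Int) (column : Int), Dom_position_to_index content line column → Pre_position_to_index content line column → Spec_position_to_index content line column (position_to_index content line column)

-- ===== LEMMAS AND PROOFS =====

-- reference single-character split, structurally recursive
def pvSplit (c : Char) : List Char → List (List Char)
  | [] => [[]]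
  | a :: r =>
    if a = c then [] :: pvSplit c r
    else
      match pvSplit c r with
      | [] => [[a]]
      | h :: t => (a :: h) :: t

theorem pvSplit_ne_nil (c : Char) (cs : List Char) : pvSplit c cs ≠ [] := by
  induction cs with
  | nil => simp [pvSplit]
  | cons a r ih =>
    simp only [pvSplit]
    split
    · simp
    · rcases hr : pvSplit c r with _ | ⟨h, t⟩ <;> simp


-- prefix length of lines before line k (0-based): sum of (len + 1) of the first k pieces
def pvS (L : List (List Char)) (k : Nat) : Nat :=
  ((L.take k).map (fun h => h.length + 1)).sum

def pvPre (p : List Char) : List (List Char) → List (List Char)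
  | [] => []
  | h :: t => (p ++ h) :: t

theorem pvSplitOn_go_single (c : Char) (l : List Char) (fuel : Nat) (hf : l.length ≤ fuel)
    (cur : List Char) (acc : List (List Char)) :
    PySem.Chars.splitOn.go [c] fuel l cur acc = acc.reverse ++ pvPre cur.reverse (pvSplit c l) := by
  induction l generalizing fuel cur acc with
  | nil =>
    rw [PySem.Chars.splitOn.go.eq_def]
    cases fuel <;> simp [pvSplit, pvPre]
  | cons a r ih =>
    rcases fuel with _ | f
    · simp at hf
    rw [PySem.Chars.splitOn.go.eq_def]
    simp only [List.length_cons] at hf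
    by_cases hac : a = c
    · subst hac
      have hpre : [a].isPrefixOf (a :: r) = true := by simp [List.isPrefixOf]
      simp only [hpre, if_true, List.length_cons, List.length_nil, List.drop_succ_cons,
        List.drop_zero]
      rw [ih f (by omega) [] (cur.reverse :: acc)]
      rcases hsr : pvSplit a r with _ | ⟨h, t⟩
      · exact absurd hsr (pvSplit_ne_nil a r)
      · simp [pvSplit, pvPre, hsr]
    · have hpre : [c].isPrefixOf (a :: r) = false := by
        simp [List.isPrefixOf]
        exact fun h => absurd h.symm hac
      simp only [hpre, Bool.false_eq_true, if_false]
      rw [ih f (by omega) (a :: cur) acc]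
      rcases hsr : pvSplit c r with _ | ⟨h, t⟩
      · exact absurd hsr (pvSplit_ne_nil c r)
      · simp [pvSplit, pvPre, hsr, hac]

theorem pvSplitOn_single (c : Char) (cs : List Char) :
    PySem.Chars.splitOn cs [c] = pvSplit c cs := by
  show PySem.Chars.splitOn.go [c] (cs.length + 1) cs [] [] = _
  rw [pvSplitOn_go_single c cs (cs.length + 1) (by omega) [] []]
  rcases hs : pvSplit c cs with _ | ⟨h, t⟩
  · exact absurd hs (pvSplit_ne_nil c cs)
  · simp [pvPre]


theorem pvCount_single (c : Char) (cs : List Char) :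
    PySem.Chars.count cs [c] = cs.count c := by
  show (if ([c] : List Char).isEmpty = true then cs.length + 1 else PySem.Chars.count.go [c] cs.length cs 0) = _
  have go : ∀ (l : List Char) (fuel : Nat), l.length ≤ fuel → ∀ acc,
      PySem.Chars.count.go [c] fuel l acc = acc + l.count c := by
    intro l
    induction l with
    | nil => intro fuel hf acc; rw [PySem.Chars.count.go.eq_def]; cases fuel <;> simp
    | cons a r ih =>
      intro fuel hf acc
      rcases fuel with _ | f
      · simp at hf
      rw [PySem.Chars.count.go.eq_def]
      simp only [List.length_cons] at hf
      by_cases hac : a = c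
      · subst hac
        have hpre : [a].isPrefixOf (a :: r) = true := by simp [List.isPrefixOf]
        simp only [hpre, if_true, List.length_cons, List.length_nil, List.drop_succ_cons,
          List.drop_zero]
        rw [ih f (by omega) (acc + 1)]
        simp
        omega
      · have hpre : [c].isPrefixOf (a :: r) = false := by
          simp [List.isPrefixOf]
          exact fun h => absurd h.symm hac
        simp only [hpre, Bool.false_eq_true, if_false]
        rw [ih f (by omega) acc]
        simp [hac]
  rw [go cs cs.length le_rfl 0]
  simp


theorem pvSplit_length (c : Char) (cs : List Char) :
    (pvSplit c cs).length = cs.count c + 1 := by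
  induction cs with
  | nil => simp [pvSplit]
  | cons a r ih =>
    simp only [pvSplit]
    split
    · rename_i hac
      subst hac
      simp [ih]
    · rename_i hac
      rcases hr : pvSplit c r with _ | ⟨h, t⟩
      · exact absurd hr (pvSplit_ne_nil c r)
      · rw [hr] at ih
        simp only [List.length_cons] at ih ⊢
        rw [List.count_cons]
        simp [hac, ih]


theorem pvFind_single (c : Char) (cs : List Char) :
    PySem.Chars.find cs [c] =
      match pvSplit c cs with
      | h :: _ :: _ => (h.length : Int)
      | _ => -1 := by
  show PySem.Chars.find.go [c] cs 0 = _
  have go : ∀ (l : List Char) (k : Nat),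
      PySem.Chars.find.go [c] l k =
        match pvSplit c l with
        | h :: _ :: _ => (k : Int) + h.length
        | _ => -1 := by
    intro l
    induction l with
    | nil => intro k; rw [PySem.Chars.find.go.eq_def]; simp [pvSplit]
    | cons a r ih =>
      intro k
      rw [PySem.Chars.find.go.eq_def]
      by_cases hac : a = c
      · subst hac
        have hpre : [a].isPrefixOf (a :: r) = true := by simp [List.isPrefixOf]
        simp only [hpre, if_true]
        rcases hsr : pvSplit a r with _ | ⟨h, t⟩
        · exact absurd hsr (pvSplit_ne_nil a r)
        · simp [pvSplit, hsr]
      · have hpre : [c].isPrefixOf (a :: r) = false := by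
          simp [List.isPrefixOf]
          exact fun h => absurd h.symm hac
        simp only [hpre, Bool.false_eq_true, if_false]
        rw [ih (k + 1)]
        rcases hsr : pvSplit c r with _ | ⟨h, t⟩
        · exact absurd hsr (pvSplit_ne_nil c r)
        · rcases t with _ | ⟨x, xs⟩
          · simp [pvSplit, hsr, hac]
          · simp [pvSplit, hsr, hac]
            ring
  rw [go cs 0]
  rcases hs : pvSplit c cs with _ | ⟨h, t⟩
  · exact absurd hs (pvSplit_ne_nil c cs)
  · rcases t with _ | ⟨x, xs⟩ <;> simp


theorem pvSplit_drop (c : Char) (cs : List Char) (h : List Char) (t : List (List Char))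
    (hs : pvSplit c cs = h :: t) (ht : t ≠ []) :
    pvSplit c (cs.drop (h.length + 1)) = t := by
  induction cs generalizing h t with
  | nil =>
    simp [pvSplit] at hs
    exact absurd hs.2 ht
  | cons a r ih =>
    simp only [pvSplit] at hs
    split at hs
    · rename_i hac
      injection hs with hs1 hs2
      subst hs1
      rw [← hs2]
      simp
    · rename_i hac
      rcases hr : pvSplit c r with _ | ⟨h', t'⟩
      · exact absurd hr (pvSplit_ne_nil c r)
      · rw [hr] at hs
        injection hs with hs1 hs2
        subst hs1
        subst hs2
        have := ih h' t' hr ht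
        simpa using this


theorem pvSplit_len_le (c : Char) (cs : List Char) (h : List Char) (t : List (List Char))
    (hs : pvSplit c cs = h :: t) (ht : t ≠ []) :
    h.length + 1 ≤ cs.length := by
  induction cs generalizing h t with
  | nil =>
    simp [pvSplit] at hs
    exact absurd hs.2 ht
  | cons a r ih =>
    simp only [pvSplit] at hs
    split at hs
    · injection hs with hs1 hs2
      subst hs1
      simp
    · rcases hr : pvSplit c r with _ | ⟨h', t'⟩
      · exact absurd hr (pvSplit_ne_nil c r)
      · rw [hr] at hs
        injection hs with hs1 hs2
        subst hs1
        subst hs2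
        have := ih h' t' hr ht
        simp only [List.length_cons]
        omega


theorem pvSplit_singleton (c : Char) (cs : List Char) (h : List Char)
    (hs : pvSplit c cs = [h]) : h = cs := by
  induction cs generalizing h with
  | nil =>
    simp [pvSplit] at hs
    exact hs
  | cons a r ih =>
    simp only [pvSplit] at hs
    split at hs
    · exact absurd (congrArg List.length hs) (by simpa using (pvSplit_ne_nil c r))
    · rcases hr : pvSplit c r with _ | ⟨h', t'⟩
      · exact absurd hr (pvSplit_ne_nil c r)
      · rw [hr] at hs
        injection hs with hs1 hs2
        subst hs1
        subst hs2
        rw [ih h' hr]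


theorem pviFindLoop_succ (content : String) (k : Nat) (pos : Int) :
    pviFindLoop content (k + 1) pos =
      PySem.Str.findFrom content "\n" (pviFindLoop content k pos) + 1 := by
  induction k generalizing pos with
  | zero => rfl
  | succ n ih =>
    show pviFindLoop content (n + 1) (PySem.Str.findFrom content "\n" pos + 1) = _
    rw [ih]
    rfl


theorem pvS_succ (L : List (List Char)) (k : Nat) (hk : k < L.length) :
    pvS L (k + 1) = pvS L k + (L[k].length + 1) := by
  have hk' : k < (List.map (fun h => h.length + 1) L).length := by simpa using hk
  unfold pvS
  rw [List.map_take, List.map_take, List.sum_take_succ _ k hk']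
  simp

theorem pvDrop_cons (L : List (List Char)) (k : Nat) (hk : k < L.length) :
    L.drop k = L[k] :: L.drop (k + 1) := List.drop_eq_getElem_cons hk

-- one step of the scan: content.find("\n", pvS k) in terms of pvSplit
theorem pvFindFrom_at (content : String) (k : Nat)
    (hk : k < (pvSplit '\n' content.toList).length)
    (hle : pvS (pvSplit '\n' content.toList) k ≤ content.toList.length)
    (hdrop : pvSplit '\n' (content.toList.drop (pvS (pvSplit '\n' content.toList) k)) =
      (pvSplit '\n' content.toList).drop k) :
    PySem.Str.findFrom content "\n" (pvS (pvSplit '\n' content.toList) k) =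
      if k + 1 < (pvSplit '\n' content.toList).length then
        ((pvS (pvSplit '\n' content.toList) k : Int) + ((pvSplit '\n' content.toList)[k].length : Int))
      else -1 := by
  have hnl : ("\n" : String).toList = ['\n'] := rfl
  rw [PySem.Str.findFrom_eq, hnl]
  rw [PySem.Chars.findFrom_natCast content.toList ['\n'] _ hle]
  rw [pvFind_single '\n' (content.toList.drop (pvS (pvSplit '\n' content.toList) k))]
  rw [hdrop, pvDrop_cons _ k hk]
  by_cases hk1 : k + 1 < (pvSplit '\n' content.toList).length
  · rw [pvDrop_cons _ (k + 1) hk1]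
    have hne : (((pvSplit '\n' content.toList)[k].length : Int)) ≠ -1 := by omega
    simp [hk1, hne]
  · have hnil : (pvSplit '\n' content.toList).drop (k + 1) = [] := by
      rw [List.drop_eq_nil_iff]
      omega
    rw [hnil]
    simp [hk1]

-- the loop invariant
theorem pviFindLoop_inv (content : String) (k : Nat)
    (hk : k < (pvSplit '\n' content.toList).length) :
    pviFindLoop content k 0 = (pvS (pvSplit '\n' content.toList) k : Int) ∧
    pvS (pvSplit '\n' content.toList) k ≤ content.toList.length ∧
    pvSplit '\n' (content.toList.drop (pvS (pvSplit '\n' content.toList) k)) =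
      (pvSplit '\n' content.toList).drop k := by
  induction k with
  | zero =>
    exact ⟨by simp [pviFindLoop, pvS], by simp [pvS],
      by rw [show pvS (pvSplit '\n' content.toList) 0 = 0 from rfl]; simp⟩
  | succ k ih =>
    obtain ⟨h1, h2, h3⟩ := ih (by omega)
    have hklt : k < (pvSplit '\n' content.toList).length := by omega
    have hff := pvFindFrom_at content k hklt h2 h3
    have hcons := pvDrop_cons _ k hklt
    have hlen : (pvSplit '\n' content.toList)[k].length + 1 ≤
        (content.toList.drop (pvS (pvSplit '\n' content.toList) k)).length := by
      refine pvSplit_len_le '\n' _ _ _ (h3.trans hcons) ?_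
      rw [Ne, List.drop_eq_nil_iff]
      omega
    rw [List.length_drop] at hlen
    have hSsucc := pvS_succ (pvSplit '\n' content.toList) k hklt
    refine ⟨?_, by omega, ?_⟩
    · rw [pviFindLoop_succ, h1, hff]
      simp only [hk, if_true]
      push_cast [hSsucc]
      ring
    · rw [hSsucc, ← List.drop_drop]
      exact pvSplit_drop '\n' _ _ _ (h3.trans hcons) (by rw [Ne, List.drop_eq_nil_iff]; omega)


theorem pvPyRange_zero_natCast (k : Nat) :
    PySem.List.pyRange 0 (k : Int) 1 = List.map (Nat.cast : Nat → Int) (List.range k) := by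
  rw [PySem.List.pyRange_of_pos 0 _ one_pos]
  rcases Nat.eq_zero_or_pos k with h0 | hpos
  · subst h0
    simp
  · have hlt : (0 : Int) < (k : Int) := by exact_mod_cast hpos
    simp only [hlt, if_true]
    have harg : (((k : Int) - 0 + 1 - 1) / 1).toNat = k := by omega
    rw [harg]
    simp only [zero_add, one_mul]

theorem pvSum_range (L : List (List Char)) (k : Nat) (hk : k ≤ L.length) :
    ((PySem.List.pyRange 0 (k : Int) 1).map
      (fun i => PySem.Chars.len (PySem.List.pyGetD L i []) + 1)).sum = (pvS L k : Int) := by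
  rw [pvPyRange_zero_natCast, List.map_map]
  induction k with
  | zero => simp [pvS]
  | succ k ih =>
    rw [List.range_succ, List.map_append, List.sum_append, ih (by omega), pvS_succ L k (by omega)]
    have hget : PySem.List.pyGetD L (k : Int) [] = L[k] := by
      rw [PySem.List.pyGetD_natCast]
      exact List.getD_eq_getElem L [] (by omega)
    simp only [List.map_cons, List.map_nil, List.sum_cons, List.sum_nil, Function.comp_apply, hget,
      PySem.Chars.len]
    push_cast
    omega

-- ===== VERDICT (by name: the statement is the Claim_ definition above) =====
theorem position_to_index_spec : Claim_equal_position_to_index := by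
  intro content line column _ hPre
  obtain ⟨k, rfl⟩ : ∃ k : Nat, line = (k : Int) + 1 := by
    refine ⟨(line - 1).toNat, ?_⟩
    have := hPre.1
    omega
  unfold Spec_position_to_index position_to_index position_to_index_alt
  unfold Pre_position_to_index at hPre
  simp only [pvSplitOn_single, add_sub_cancel_right, Int.toNat_natCast] at hPre ⊢
  obtain ⟨hl1, hl2, hc0, hcU⟩ := hPre
  have hkL : k < (pvSplit '\n' content.toList).length := by omega
  obtain ⟨h1, h2, h3⟩ := pviFindLoop_inv content k hkL
  have hgetD : (pvSplit '\n' content.toList).getD k [] =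
      (pvSplit '\n' content.toList)[k] :=
    List.getD_eq_getElem _ [] hkL
  rw [hgetD] at hcU
  have hcount : (PySem.Str.count content "\n" : Int) = ((pvSplit '\n' content.toList).length : Int) - 1 := by
    rw [PySem.Str.count_eq, show ("\n" : String).toList = ['\n'] from rfl, pvCount_single]
    have hplen := pvSplit_length '\n' content.toList
    omega
  have hgetDA : PySem.List.pyGetD (pvSplit '\n' content.toList) (k : Int) [] =
      (pvSplit '\n' content.toList)[k] := by
    rw [PySem.List.pyGetD_natCast]
    exact hgetD
  -- A's guards are false
  have hg1 : (decide ((k : Int) + 1 < 1) ||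
      decide ((k : Int) + 1 > ((pvSplit '\n' content.toList).length : Int))) = false := by
    simp
    omega
  have hg2 : (decide (column < 0) ||
      decide (column > PySem.Chars.len (PySem.List.pyGetD (pvSplit '\n' content.toList) (k : Int) []))) = false := by
    rw [hgetDA]
    simp only [PySem.Chars.len]
    simp
    omega
  rw [hg1, hg2]
  simp only [Bool.false_eq_true, if_false]
  -- B's first guard is false
  have hg1b : (decide ((k : Int) + 1 < 1) ||
      decide ((k : Int) + 1 > (PySem.Str.count content "\n" : Int) + 1)) = false := by
    rw [hcount]
    simp
    omega
  rw [hg1b]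
  simp only [Bool.false_eq_true, if_false]
  rw [h1]
  rw [pvSum_range (pvSplit '\n' content.toList) k (le_of_lt hkL)]
  have hff := pvFindFrom_at content k hkL h2 h3
  by_cases hlast : k + 1 < (pvSplit '\n' content.toList).length
  · -- not the last line: find returns the position of the next newline
    rw [hff]
    simp only [hlast, if_true]
    have hne : (((pvS (pvSplit '\n' content.toList) k : Int) +
        ((pvSplit '\n' content.toList)[k].length : Int)) == -1) = false := by
      simp
      omega
    rw [hne]
    simp only [Bool.false_eq_true, if_false]
    have hg3 : (decide (column < 0) || decide (column >
        (pvS (pvSplit '\n' content.toList) k : Int) +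
          ((pvSplit '\n' content.toList)[k].length : Int) -
        (pvS (pvSplit '\n' content.toList) k : Int))) = false := by
      simp
      omega
    rw [hg3]
    simp
  · -- last line: find returns -1 and the line ends at len(content)
    rw [hff]
    simp only [hlast, if_false]
    have hdropall : (pvSplit '\n' content.toList).drop (k + 1) = [] := by
      rw [List.drop_eq_nil_iff]
      omega
    have hsingle : pvSplit '\n'
        (content.toList.drop (pvS (pvSplit '\n' content.toList) k)) =
        [(pvSplit '\n' content.toList)[k]] := by
      rw [h3, pvDrop_cons _ _ hkL, hdropall]
    have hdropeq := pvSplit_singleton '\n' _ _ hsingle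
    have hlen : content.toList.length - pvS (pvSplit '\n' content.toList) k =
        (pvSplit '\n' content.toList)[k].length := by
      rw [hdropeq, List.length_drop]
    have hne : ((-1 : Int) == -1) = true := by decide
    rw [hne]
    simp only [if_true]
    have hg3 : (decide (column < 0) || decide (column >
        PySem.Str.len content - (pvS (pvSplit '\n' content.toList) k : Int))) = false := by
      have hb : PySem.Str.len content = (content.toList.length : Int) := rfl
      rw [hb, Bool.or_eq_false_iff, decide_eq_false_iff_not, decide_eq_false_iff_not]
      constructor <;> omega
    rw [hg3]
    simp
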